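-- pv_equiv track=rewrite | github.com/asapdiscovery/asapdiscovery | asapdiscovery-alchemy/asapdiscovery/alchemy/schema/_alchemiscale.py | _hierarchy_valid
-- ===== SOURCE A (Python) =====
-- from typing import Optional, Union
--
-- def _is_wildcard(char: Union[str, None]) -> bool:
--     return char is None
--
-- def _find_wildcard(scope_list: list) -> Union[int, None]:
--     """Finds the index of the first wildcard in a scope list."""
--     for i, scope in enumerate(scope_list):
--         if _is_wildcard(scope):
--             return i
--     return None
--
-- def _hierarchy_valid(scope_dict: dict[str : Union[str, None]]) -> bool:
--     """Checks that the scope hierarchy is valid from a dictionary of scope components."""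
--
--     org = scope_dict.get("org")
--     campaign = scope_dict.get("campaign")
--     project = scope_dict.get("project")
--     scope_list = [org, campaign, project]
--
--     first_wildcard_ix = _find_wildcard(scope_list)
--     if first_wildcard_ix is None:  # no wildcards, so we're good
--         return True
--
--     sublevels = scope_list[first_wildcard_ix:]
--     # now check if any of the sublevels are not wildcards
--     if any([not _is_wildcard(i) for i in sublevels]):
--         return False
--     return True
-- ===== SOURCE B (Python) =====
-- def _hierarchy_valid(scope_dict: dict) -> bool:
--     """Checks that the scope hierarchy is valid from a dictionary of scope components."""
--     wildcard_seen = False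
--     for value in (scope_dict.get("org"), scope_dict.get("campaign"), scope_dict.get("project")):
--         if value is None:
--             wildcard_seen = True
--         elif wildcard_seen:
--             return False
--     return True
-- ===== Notes on version B (the rewrite author's own statement) =====
-- stated objective: simpler
-- what changed: Replaces the locate-first-wildcard helper plus suffix slice and any() rescan with a single stateful pass that flags the first wildcard and fails on any later non-wildcard.
import Mathlib
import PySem

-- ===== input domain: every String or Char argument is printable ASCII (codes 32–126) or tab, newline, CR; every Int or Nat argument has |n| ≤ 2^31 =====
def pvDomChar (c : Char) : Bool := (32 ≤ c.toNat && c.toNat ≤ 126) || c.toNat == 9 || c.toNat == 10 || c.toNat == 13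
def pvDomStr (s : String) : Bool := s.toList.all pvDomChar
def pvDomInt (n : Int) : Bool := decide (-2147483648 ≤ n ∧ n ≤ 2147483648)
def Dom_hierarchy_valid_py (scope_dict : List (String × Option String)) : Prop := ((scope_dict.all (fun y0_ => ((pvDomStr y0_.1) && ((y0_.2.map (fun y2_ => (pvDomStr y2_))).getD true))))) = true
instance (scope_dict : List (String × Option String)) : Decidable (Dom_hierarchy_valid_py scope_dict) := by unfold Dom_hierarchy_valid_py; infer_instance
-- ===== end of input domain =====

-- ===== PORT A =====
-- dict.get(k): first-match lookup in the association list, returning the value (itself Optional) or None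
def pyget (sd : List (String × Option String)) (k : String) : Option String :=
  match sd.find? (fun p => p.1 == k) with
  | some p => p.2
  | none => none

def is_wildcard_py (c : Option String) : Bool := c.isNone

-- _find_wildcard: first index whose element is a wildcard (Python returns an int or None)
def find_wildcard_py (scope_list : List (Option String)) : Option Int :=
  (PySem.List.enumerate scope_list).findSome?
    (fun p => if is_wildcard_py p.2 then some p.1 else none)

def hierarchy_valid_py (scope_dict : List (String × Option String)) : Bool :=
  let org := pyget scope_dict "org"
  let campaign := pyget scope_dict "campaign"
  let project := pyget scope_dict "project"
  let scope_list := [org, campaign, project]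
  match find_wildcard_py scope_list with
  | none => true
  | some first_wildcard_ix =>
    let sublevels := PySem.List.slice scope_list (some first_wildcard_ix) none
    if sublevels.any (fun i => !is_wildcard_py i) then false else true

-- ===== PORT B =====
-- single pass: flag the first wildcard, fail on any later non-wildcard
def scanWildcards : List (Option String) → Bool → Bool
  | [], _ => true
  | none :: rest, _ => scanWildcards rest true
  | some _ :: rest, wildcard_seen =>
    if wildcard_seen then false else scanWildcards rest wildcard_seen

def hierarchy_valid_py_alt (scope_dict : List (String × Option String)) : Bool :=
  scanWildcards
    [pyget scope_dict "org", pyget scope_dict "campaign", pyget scope_dict "project"] false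

-- ===== PRECONDITION & SPEC =====
def Spec_hierarchy_valid_py (scope_dict : List (String × Option String)) (out : Bool) : Prop := out = hierarchy_valid_py_alt scope_dict
instance (scope_dict : List (String × Option String)) (out : Bool) : Decidable (Spec_hierarchy_valid_py scope_dict out) := by unfold Spec_hierarchy_valid_py; infer_instance

-- ===== CLAIM (what is proved, stated in full; the proofs are below) =====
def Claim_equal_hierarchy_valid_py : Prop := ∀ (scope_dict : List (String × Option String)), Dom_hierarchy_valid_py scope_dict → Spec_hierarchy_valid_py scope_dict (hierarchy_valid_py scope_dict)

-- ===== LEMMAS AND PROOFS =====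
-- both programs agree on every triple of scope values
lemma core_eq (o c p : Option String) :
    hierarchy_valid_py_alt [("org", o), ("campaign", c), ("project", p)]
      = hierarchy_valid_py [("org", o), ("campaign", c), ("project", p)] := by
  rcases o with _ | so <;> rcases c with _ | sc <;> rcases p with _ | sp <;>
    simp [hierarchy_valid_py, hierarchy_valid_py_alt, scanWildcards, pyget,
      find_wildcard_py, is_wildcard_py, PySem.List.enumerate, PySem.List.slice,
      PySem.List.clampIdx]

-- ===== VERDICT (by name: the statement is the Claim_ definition above) =====
theorem hierarchy_valid_py_spec : Claim_equal_hierarchy_valid_py := by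
  intro sd _
  unfold Spec_hierarchy_valid_py
  exact (core_eq (pyget sd "org") (pyget sd "campaign") (pyget sd "project")).symm
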